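-- pv_equiv track=rewrite | github.com/Ace1928/eidosian_forge | archive_forge/code/func__replace_parenthesized_ambigs.py | _replace_parenthesized_ambigs
-- ===== SOURCE A (Python) =====
-- def _replace_parenthesized_ambigs(seq, rev_ambig_values):
--     """Replace ambigs in xxx(ACG)xxx format by IUPAC ambiguity code (PRIVATE)."""
--     opening = seq.find('(')
--     while opening > -1:
--         closing = seq.find(')')
--         if closing < 0:
--             raise NexusError('Missing closing parenthesis in: ' + seq)
--         elif closing < opening:
--             raise NexusError('Missing opening parenthesis in: ' + seq)
--         ambig = ''.join(sorted(seq[opening + 1:closing]))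
--         ambig_code = rev_ambig_values[ambig.upper()]
--         if ambig != ambig.upper():
--             ambig_code = ambig_code.lower()
--         seq = seq[:opening] + ambig_code + seq[closing + 1:]
--         opening = seq.find('(')
--     return seq
-- ===== SOURCE B (Python) =====
-- class NexusError(Exception):
--     pass
--
--
-- def _replace_parenthesized_ambigs(seq, rev_ambig_values):
--     """Single linear scan: copy plain characters, translate each (…) group once."""
--     out = []
--     i = 0
--     n = len(seq)
--     while i < n:
--         c = seq[i]
--         if c == '(':
--             j = i + 1
--             while j < n and seq[j] != ')':
--                 j += 1
--             if j == n:
--                 raise NexusError('Missing closing parenthesis in: ' + seq)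
--             ambig = ''.join(sorted(seq[i + 1:j]))
--             code = rev_ambig_values[ambig.upper()]
--             if ambig != ambig.upper():
--                 code = code.lower()
--             out.append(code)
--             i = j + 1
--         else:
--             out.append(c)
--             i += 1
--     return ''.join(out)
-- ===== Notes on version B (the rewrite author's own statement) =====
-- stated objective: alternative
-- what changed: A repeatedly rescans the whole string with find() and rebuilds it by slicing after every group; B makes one left-to-right scan with an output list, translating each parenthesized group once and never rescanning substituted text; Pre_ excludes inputs where A raises (unmatched parentheses, missing dict key) and inputs whose replacement codes contain parentheses, on which A rescans substituted text while B emits codes verbatim.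
-- outside the precondition, e.g. on _replace_parenthesized_ambigs('(A)', {'A': '(B)', 'B': 'X'}): A returns 'X', B returns '(B)'
import Mathlib
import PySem

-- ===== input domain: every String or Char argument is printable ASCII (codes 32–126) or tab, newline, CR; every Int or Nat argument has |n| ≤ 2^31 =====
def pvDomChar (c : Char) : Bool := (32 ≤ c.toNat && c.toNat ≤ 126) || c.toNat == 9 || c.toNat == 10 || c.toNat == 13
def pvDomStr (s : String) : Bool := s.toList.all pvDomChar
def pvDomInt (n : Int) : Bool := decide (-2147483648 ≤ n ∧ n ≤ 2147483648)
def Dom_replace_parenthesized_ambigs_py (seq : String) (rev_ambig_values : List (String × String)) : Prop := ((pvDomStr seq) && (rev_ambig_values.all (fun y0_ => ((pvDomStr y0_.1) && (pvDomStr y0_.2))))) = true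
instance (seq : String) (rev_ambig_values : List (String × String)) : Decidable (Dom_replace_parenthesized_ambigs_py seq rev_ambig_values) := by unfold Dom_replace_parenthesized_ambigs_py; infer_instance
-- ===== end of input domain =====

-- B replaces A's repeated find-and-rebuild loop by one left-to-right scan that emits each
-- character or translated group once (objective: alternative; same return value, different algorithm).
-- Equality is claimed on Pre_: inputs where A returns without raising and replacement codes are parenthesis-free.

-- ===== PORT A =====
-- while loop of A, with fuel = count of '(' + 1 (inside Pre_ every iteration consumes one '(')
def replaceLoopA (rev : List (String × String)) : Nat → String → String
  | 0, seq => seq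
  | fuel + 1, seq =>
    let opening := PySem.Str.find seq "("
    if opening > -1 then
      let closing := PySem.Str.find seq ")"
      if closing < 0 then seq         -- Python: raise NexusError (outside Pre_)
      else if closing < opening then seq  -- Python: raise NexusError (outside Pre_)
      else
        let ambig := String.ofList (PySem.List.sorted (PySem.Str.slice seq (some (opening + 1)) (some closing)).toList (fun c => c) false)
        match PySem.Dict.get? (PySem.Dict.mk rev) (PySem.Str.upper ambig) with
        | none => seq                 -- Python: KeyError (outside Pre_)
        | some code0 =>
          let code := if ambig ≠ PySem.Str.upper ambig then PySem.Str.lower code0 else code0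
          replaceLoopA rev fuel (PySem.Str.slice seq none (some opening) ++ code ++ PySem.Str.slice seq (some (closing + 1)) none)
    else seq

def replace_parenthesized_ambigs_py (seq : String) (rev_ambig_values : List (String × String)) : String :=
  replaceLoopA rev_ambig_values (seq.toList.count '(' + 1) seq

-- ===== PORT B =====
-- single scan over the characters; each (…) group is translated once, every other character is copied
def scanB (rev : List (String × String)) : List Char → List Char
  | [] => []
  | c :: rest =>
    if c = '(' then
      let content := rest.takeWhile (· ≠ ')')
      let rest' := rest.dropWhile (· ≠ ')')
      if rest' = [] then content       -- Python: raise NexusError missing closing (outside Pre_)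
      else
        let ambig := PySem.List.sorted content (fun c => c) false
        match PySem.Dict.get? (PySem.Dict.mk rev) (String.ofList (PySem.Chars.upper ambig)) with
        | none => []                   -- Python: KeyError (outside Pre_)
        | some code0 =>
          let code := if ambig ≠ PySem.Chars.upper ambig then PySem.Str.lower code0 else code0
          code.toList ++ scanB rev rest'.tail
    else c :: scanB rev rest
termination_by l => l.length
decreasing_by
  · have h1 : (rest.dropWhile (· ≠ ')')).length ≤ rest.length := rest.length_dropWhile_le _
    have h2 : (rest.dropWhile (· ≠ ')')).tail.length ≤ (rest.dropWhile (· ≠ ')')).length := by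
      cases rest.dropWhile (· ≠ ')') <;> simp
    simp only [List.length_cons]
    omega
  · simp

def replace_parenthesized_ambigs_py_alt (seq : String) (rev_ambig_values : List (String × String)) : String :=
  String.ofList (scanB rev_ambig_values seq.toList)

-- ===== PRECONDITION & SPEC =====
-- structural state-machine check of the INPUT (no simulation of the rewriting itself):
-- outside parens: a '(' opens a group, a stray ')' is only allowed when no '(' follows;
-- inside a group (acc = content so far, reversed): at ')' the sorted-uppercased content must be a
-- dict key whose code is parenthesis-free
def goodAux (rev : List (String × String)) (st : Option (List Char)) : List Char → Bool
  | [] => st.isNone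
  | c :: rest =>
    match st with
    | none =>
      if c = '(' then goodAux rev (some []) rest
      else if c = ')' then decide ('(' ∉ rest)
      else goodAux rev none rest
    | some acc =>
      if c = ')' then
        match PySem.Dict.get? (PySem.Dict.mk rev) (String.ofList (PySem.Chars.upper (PySem.List.sorted acc.reverse (fun c => c) false))) with
        | none => false
        | some v => decide ('(' ∉ v.toList ∧ ')' ∉ v.toList) && goodAux rev none rest
      else goodAux rev (some (c :: acc)) rest

-- Pre_ excludes inputs where A raises (NexusError / KeyError) and inputs whose looked-up replacement
-- codes contain a parenthesis, on which A rescans the substituted text (possibly re-substituting) while B emits codes verbatim.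
def Pre_replace_parenthesized_ambigs_py (seq : String) (rev_ambig_values : List (String × String)) : Prop :=
  goodAux rev_ambig_values none seq.toList = true
instance (seq : String) (rev_ambig_values : List (String × String)) : Decidable (Pre_replace_parenthesized_ambigs_py seq rev_ambig_values) := by unfold Pre_replace_parenthesized_ambigs_py; infer_instance

def pvWitness_replace_parenthesized_ambigs_py : String × (List (String × String)) :=
  ("x(ACG)t(acg)", [("ACG", "V"), ("A", "A")])

def Spec_replace_parenthesized_ambigs_py (seq : String) (rev_ambig_values : List (String × String)) (out : String) : Prop := out = replace_parenthesized_ambigs_py_alt seq rev_ambig_values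
instance (seq : String) (rev_ambig_values : List (String × String)) (out : String) : Decidable (Spec_replace_parenthesized_ambigs_py seq rev_ambig_values out) := by unfold Spec_replace_parenthesized_ambigs_py; infer_instance

-- ===== CLAIM (what is proved, stated in full; the proofs are below) =====
def Claim_equal_replace_parenthesized_ambigs_py : Prop := ∀ (seq : String) (rev_ambig_values : List (String × String)), Dom_replace_parenthesized_ambigs_py seq rev_ambig_values → Pre_replace_parenthesized_ambigs_py seq rev_ambig_values → Spec_replace_parenthesized_ambigs_py seq rev_ambig_values (replace_parenthesized_ambigs_py seq rev_ambig_values)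

-- ===== LEMMAS AND PROOFS =====

-- --- generic list helpers ---

theorem takeWhile_ne_not_mem (c : Char) (l : List Char) : c ∉ l.takeWhile (· ≠ c) := by
  intro h
  have := List.mem_takeWhile_imp h
  simp at this

theorem split_at_first (c : Char) (l : List Char) (h : c ∈ l) :
    l = l.takeWhile (· ≠ c) ++ c :: (l.dropWhile (· ≠ c)).tail := by
  induction l with
  | nil => cases h
  | cons a t ih =>
    by_cases hac : a = c
    · subst hac; simp [List.takeWhile_cons, List.dropWhile_cons]
    · have hct : c ∈ t := by cases h with
        | head => exact absurd rfl hac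
        | tail _ h' => exact h'
      simp only [List.takeWhile_cons, List.dropWhile_cons]
      have hd : (decide (a ≠ c)) = true := by simp [hac]
      rw [hd]
      simpa using ih hct

theorem singleton_infix_iff (c : Char) (l : List Char) : [c] <:+: l ↔ c ∈ l := by
  constructor
  · intro h; exact h.subset (by simp)
  · intro h
    obtain ⟨s, t, rfl⟩ := List.append_of_mem h
    exact ⟨s, t, by simp⟩

theorem singleton_prefix_iff (c : Char) (xs : List Char) : [c] <+: xs ↔ xs.head? = some c := by
  constructor
  · rintro ⟨t, rfl⟩; rfl
  · intro h; cases xs with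
    | nil => simp at h
    | cons a t => simp at h; exact ⟨t, by simp [h]⟩

theorem find_singleton_not_mem (c : Char) (l : List Char) (h : c ∉ l) :
    PySem.Chars.find l [c] = -1 := by
  rw [PySem.Chars.find_eq_neg_one_iff, singleton_infix_iff]; exact h

theorem find_singleton_first (c : Char) (pre rest : List Char) (h : c ∉ pre) :
    PySem.Chars.find (pre ++ c :: rest) [c] = (pre.length : Int) := by
  have hin : [c] <:+: (pre ++ c :: rest) := by
    rw [singleton_infix_iff]; simp
  have hnn : 0 ≤ PySem.Chars.find (pre ++ c :: rest) [c] := by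
    rw [PySem.Chars.find_nonneg_iff]; exact hin
  obtain ⟨h1, h2⟩ := PySem.Chars.find_spec hnn
  set f := (PySem.Chars.find (pre ++ c :: rest) [c]).toNat with hf
  have hfc : (pre ++ c :: rest)[f]? = some c := by
    rw [← List.head?_drop]
    rw [singleton_prefix_iff] at h1
    exact h1
  rcases lt_trichotomy f pre.length with hlt | heq | hgt
  · exfalso
    rw [List.getElem?_append_left hlt] at hfc
    exact h (List.mem_of_getElem? hfc)
  · omega
  · exfalso
    have : [c] <+: (pre ++ c :: rest).drop pre.length := by
      rw [List.drop_append_of_le_length (le_refl _)]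
      simp
    exact h2 pre.length hgt this

theorem takeWhile_append_all {p : Char → Bool} {l₁ l₂ : List Char}
    (h : ∀ x ∈ l₁, p x = true) : (l₁ ++ l₂).takeWhile p = l₁ ++ l₂.takeWhile p := by
  induction l₁ with
  | nil => simp
  | cons a t ih =>
    have ha := h a (by simp)
    simp [List.takeWhile_cons, ha, ih (fun x hx => h x (by simp [hx]))]

theorem dropWhile_append_all {p : Char → Bool} {l₁ l₂ : List Char}
    (h : ∀ x ∈ l₁, p x = true) : (l₁ ++ l₂).dropWhile p = l₂.dropWhile p := by
  induction l₁ with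
  | nil => simp
  | cons a t ih =>
    have ha := h a (by simp)
    simp [List.dropWhile_cons, ha, ih (fun x hx => h x (by simp [hx]))]

-- --- scanB structure ---

theorem scanB_no_open (rev : List (String × String)) (l : List Char) (h : '(' ∉ l) :
    scanB rev l = l := by
  induction l with
  | nil => rw [scanB]
  | cons a t ih =>
    have ha : a ≠ '(' := fun hh => h (by simp [hh])
    have ht : '(' ∉ t := fun hh => h (by simp [hh])
    rw [scanB]
    simp only [if_neg ha]
    rw [ih ht]

theorem scanB_append_plain (rev : List (String × String)) (pre m : List Char)
    (h : ∀ x ∈ pre, x ≠ '(') : scanB rev (pre ++ m) = pre ++ scanB rev m := by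
  induction pre with
  | nil => simp
  | cons a t ih =>
    have ha1 := h a (by simp)
    rw [List.cons_append, scanB]
    simp only [if_neg ha1]
    rw [ih (fun x hx => h x (by simp [hx]))]
    simp

-- --- goodSeq: the recursive form of the precondition used by the proofs ---

-- structural scan of the INPUT: each '(' is closed before the next paren event, no stray ')' before a '(',
-- every group's sorted-uppercased content is a key of the dict, and each used code is parenthesis-free
def goodSeq (rev : List (String × String)) : List Char → Bool
  | l =>
    if '(' ∈ l then
      let pre := l.takeWhile (· ≠ '(')
      let rest := (l.dropWhile (· ≠ '(')).tail
      if ')' ∈ pre then false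
      else if ')' ∈ rest then
        let content := rest.takeWhile (· ≠ ')')
        let tail := (rest.dropWhile (· ≠ ')')).tail
        match PySem.Dict.get? (PySem.Dict.mk rev) (String.ofList (PySem.Chars.upper (PySem.List.sorted content (fun c => c) false))) with
        | none => false
        | some v => decide ('(' ∉ v.toList ∧ ')' ∉ v.toList) && goodSeq rev tail
      else false
    else true
termination_by l => l.length
decreasing_by
  have h0 : (l.dropWhile (· ≠ '(')).length ≤ l.length := l.length_dropWhile_le _
  have h1 : ((l.dropWhile (· ≠ '(')).tail.dropWhile (· ≠ ')')).length ≤ (l.dropWhile (· ≠ '(')).tail.length :=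
    List.length_dropWhile_le _ _
  have h2 : (l.dropWhile (· ≠ '(')) ≠ [] := by
    intro hnil
    rename_i hmem _ _
    have h := List.takeWhile_append_dropWhile (p := fun x => decide (x ≠ '(')) (l := l)
    rw [hnil, List.append_nil] at h
    rw [← h] at hmem
    have := List.mem_takeWhile_imp hmem
    simp at this
  have h3 : (l.dropWhile (· ≠ '(')).tail.length < l.length := by
    cases hd : l.dropWhile (· ≠ '(') with
    | nil => exact absurd hd h2
    | cons a t => rw [hd] at h0; simp at h0 ⊢; omega
  have h4 : ((l.dropWhile (· ≠ '(')).tail.dropWhile (· ≠ ')')).tail.length ≤ ((l.dropWhile (· ≠ '(')).tail.dropWhile (· ≠ ')')).length := by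
    cases ((l.dropWhile (· ≠ '(')).tail.dropWhile (· ≠ ')')) <;> simp
  show (List.dropWhile (fun x => decide (x ≠ ')')) (List.dropWhile (fun x => decide (x ≠ '(')) l).tail).tail.length < l.length
  omega

-- --- goodSeq glue ---

theorem goodSeq_glue (rev : List (String × String)) (a tail : List Char)
    (h : ∀ x ∈ a, x ≠ '(' ∧ x ≠ ')') (hg : goodSeq rev tail = true) :
    goodSeq rev (a ++ tail) = true := by
  have hao : '(' ∉ a := fun hx => (h _ hx).1.elim rfl
  have hac : ')' ∉ a := fun hx => (h _ hx).2.elim rfl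
  by_cases hop : '(' ∈ tail
  · have hop' : '(' ∈ a ++ tail := by simp [hop]
    rw [goodSeq] at hg ⊢
    rw [if_pos hop']
    rw [if_pos hop] at hg
    have htw : (a ++ tail).takeWhile (· ≠ '(') = a ++ tail.takeWhile (· ≠ '(') :=
      takeWhile_append_all (fun x hx => by simp [(h x hx).1])
    have hdw : (a ++ tail).dropWhile (· ≠ '(') = tail.dropWhile (· ≠ '(') :=
      dropWhile_append_all (fun x hx => by simp [(h x hx).1])
    rw [htw, hdw]
    by_cases hcp : ')' ∈ tail.takeWhile (· ≠ '(')
    · rw [if_pos hcp] at hg; cases hg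
    · rw [if_neg hcp] at hg
      rw [if_neg (by
        simp only [List.mem_append, not_or]
        exact ⟨hac, by simpa [ne_eq, decide_not] using hcp⟩)]
      exact hg
  · have : '(' ∉ a ++ tail := by simp [hao, hop]
    rw [goodSeq, if_neg this]

-- --- characters and codes ---

theorem lowerChar_paren (c x : Char) (hx : x.toNat < 65) (h : PySem.Chars.lowerChar c = x) : c = x := by
  unfold PySem.Chars.lowerChar at h
  split_ifs at h with hu
  · exfalso
    unfold PySem.Chars.isupper at hu
    simp only [Bool.and_eq_true, decide_eq_true_eq] at hu
    obtain ⟨ha, hb⟩ := hu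
    rw [Char.le_def] at ha hb
    rw [UInt32.le_iff_toNat_le] at ha hb
    have h1 : 65 ≤ c.toNat := ha
    have h2 : c.toNat ≤ 90 := hb
    have hv : (c.toNat + 32).isValidChar := Or.inl (by omega)
    have ht := congrArg Char.toNat h
    rw [Char.toNat_ofNat, if_pos hv] at ht
    omega
  · exact h

theorem lower_parenfree (v : String) (hv1 : '(' ∉ v.toList) (hv2 : ')' ∉ v.toList) :
    ∀ x ∈ (PySem.Str.lower v).toList, x ≠ '(' ∧ x ≠ ')' := by
  intro x hx
  simp only [PySem.Str.lower, String.toList_ofList, PySem.Chars.lower, List.mem_map] at hx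
  obtain ⟨y, hy, rfl⟩ := hx
  constructor
  · intro h
    exact hv1 ((lowerChar_paren y '(' (by decide) h) ▸ hy)
  · intro h
    exact hv2 ((lowerChar_paren y ')' (by decide) h) ▸ hy)

-- --- one group step of scanB ---

theorem scanB_group (rev : List (String × String)) (content tail : List Char) (hco : ')' ∉ content) :
    scanB rev ('(' :: (content ++ ')' :: tail)) =
      (match PySem.Dict.get? (PySem.Dict.mk rev) (String.ofList (PySem.Chars.upper (PySem.List.sorted content (fun c => c) false))) with
        | none => []
        | some code0 =>
          (if PySem.List.sorted content (fun c => c) false ≠ PySem.Chars.upper (PySem.List.sorted content (fun c => c) false)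
            then PySem.Str.lower code0 else code0).toList ++ scanB rev tail) := by
  have htw : (content ++ ')' :: tail).takeWhile (· ≠ ')') = content := by
    rw [takeWhile_append_all (fun x hx => by simp; exact fun h => hco (h ▸ hx))]
    simp
  have hdw : (content ++ ')' :: tail).dropWhile (· ≠ ')') = ')' :: tail := by
    rw [dropWhile_append_all (fun x hx => by simp; exact fun h => hco (h ▸ hx))]
    simp
  conv_lhs => rw [scanB]
  simp only [htw, hdw, if_pos rfl, List.tail_cons, reduceCtorEq, if_neg, ite_false]
  simp

-- --- goodAux computes goodSeq ---

theorem goodAux_no_open (rev : List (String × String)) (l : List Char) (h : '(' ∉ l) :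
    goodAux rev none l = true := by
  induction l with
  | nil => rfl
  | cons c rest ih =>
    have hc : c ≠ '(' := fun hh => h (by simp [hh])
    have hr : '(' ∉ rest := fun hh => h (by simp [hh])
    rw [goodAux]
    simp only [if_neg hc]
    by_cases hcc : c = ')'
    · rw [if_pos hcc]; simpa using hr
    · rw [if_neg hcc]; exact ih hr

theorem goodAux_plain (rev : List (String × String)) (pre m : List Char)
    (h : ∀ x ∈ pre, x ≠ '(' ∧ x ≠ ')') : goodAux rev none (pre ++ m) = goodAux rev none m := by
  induction pre with
  | nil => simp
  | cons c t ih =>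
    obtain ⟨h1, h2⟩ := h c (by simp)
    rw [List.cons_append, goodAux]
    simp only [if_neg h1, if_neg h2]
    exact ih (fun x hx => h x (by simp [hx]))

theorem goodAux_stray (rev : List (String × String)) (pre rest : List Char)
    (h1 : '(' ∉ pre) (h2 : ')' ∈ pre) : goodAux rev none (pre ++ '(' :: rest) = false := by
  induction pre with
  | nil => cases h2
  | cons c t ih =>
    have hc1 : c ≠ '(' := fun hh => h1 (by simp [hh])
    rw [List.cons_append, goodAux]
    simp only [if_neg hc1]
    by_cases hc2 : c = ')'
    · rw [if_pos hc2]
      simp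
    · rw [if_neg hc2]
      have h2' : ')' ∈ t := by cases h2 with
        | head => exact absurd rfl hc2
        | tail _ hh => exact hh
      exact ih (fun hh => h1 (by simp [hh])) h2'

theorem goodAux_group_noclose (rev : List (String × String)) (acc m : List Char) (h : ')' ∉ m) :
    goodAux rev (some acc) m = false := by
  induction m generalizing acc with
  | nil => rfl
  | cons c rest ih =>
    have hc : c ≠ ')' := fun hh => h (by simp [hh])
    rw [goodAux]
    simp only [if_neg hc]
    exact ih _ (fun hh => h (by simp [hh]))

theorem goodAux_group (rev : List (String × String)) (acc content tail : List Char)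
    (h : ')' ∉ content) :
    goodAux rev (some acc) (content ++ ')' :: tail) =
      (match PySem.Dict.get? (PySem.Dict.mk rev) (String.ofList (PySem.Chars.upper (PySem.List.sorted (acc.reverse ++ content) (fun c => c) false))) with
        | none => false
        | some v => decide ('(' ∉ v.toList ∧ ')' ∉ v.toList) && goodAux rev none tail) := by
  induction content generalizing acc with
  | nil =>
    rw [List.nil_append, goodAux]
    simp
  | cons c t ih =>
    have hc : c ≠ ')' := fun hh => h (by simp [hh])
    rw [List.cons_append, goodAux]
    simp only [if_neg hc]
    rw [ih (c :: acc) (fun hh => h (by simp [hh]))]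
    simp

theorem goodAux_eq (rev : List (String × String)) (l : List Char) :
    goodAux rev none l = goodSeq rev l := by
  induction hn : l.length using Nat.strong_induction_on generalizing l with
  | _ n ih =>
  subst hn
  by_cases hop : '(' ∈ l
  · set pre := l.takeWhile (· ≠ '(') with hpre
    set rest := (l.dropWhile (· ≠ '(')).tail with hrest
    have hsplit : l = pre ++ '(' :: rest := split_at_first '(' l hop
    have hpo : '(' ∉ pre := takeWhile_ne_not_mem '(' l
    rw [goodSeq, if_pos hop, ← hpre, ← hrest]
    by_cases hcp : ')' ∈ pre
    · rw [if_pos hcp]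
      conv_lhs => rw [hsplit]
      exact goodAux_stray rev pre rest hpo hcp
    rw [if_neg hcp]
    have hplain : goodAux rev none l = goodAux rev (some []) rest := by
      conv_lhs => rw [hsplit]
      rw [goodAux_plain rev pre _ (fun x hx => ⟨fun hh => hpo (hh ▸ hx), fun hh => hcp (hh ▸ hx)⟩)]
      rw [goodAux]
      simp
    by_cases hcr : ')' ∈ rest
    swap
    · rw [if_neg hcr, hplain]
      exact goodAux_group_noclose rev [] rest hcr
    rw [if_pos hcr]
    set content := rest.takeWhile (· ≠ ')') with hcont
    set tail := (rest.dropWhile (· ≠ ')')).tail with htail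
    have hrsplit : rest = content ++ ')' :: tail := split_at_first ')' rest hcr
    have hco : ')' ∉ content := takeWhile_ne_not_mem ')' rest
    rw [hplain]
    conv_lhs => rw [hrsplit]
    rw [goodAux_group rev [] content tail hco]
    have hlen : tail.length < l.length := by
      rw [hsplit, hrsplit]
      simp
      omega
    rw [List.reverse_nil, List.nil_append]
    rw [ih tail.length hlen tail rfl]
  · rw [goodSeq, if_neg hop]
    exact goodAux_no_open rev l hop

-- --- the main loop lemma ---

theorem toList_ne_iff (s t : String) : s ≠ t ↔ s.toList ≠ t.toList := by
  constructor
  · intro h h2; exact h (by ext1; simpa using congrArg (·) h2 ▸ rfl)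
  · intro h h2; exact h (by rw [h2])

set_option maxHeartbeats 2000000 in
theorem main_loop (rev : List (String × String)) (fuel : Nat) (l : List Char)
    (hg : goodSeq rev l = true) (hf : l.count '(' < fuel) :
    replaceLoopA rev fuel (String.ofList l) = String.ofList (scanB rev l) := by
  induction fuel generalizing l with
  | zero => omega
  | succ f ih =>
    by_cases hop : '(' ∈ l
    · -- decompose l = pre ++ '(' :: rest
      set pre := l.takeWhile (· ≠ '(') with hpre
      set rest := (l.dropWhile (· ≠ '(')).tail with hrest
      have hsplit : l = pre ++ '(' :: rest := split_at_first '(' l hop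
      have hpo : '(' ∉ pre := takeWhile_ne_not_mem '(' l
      -- unpack goodSeq
      rw [goodSeq, if_pos hop] at hg
      rw [← hpre, ← hrest] at hg
      by_cases hcp : ')' ∈ pre
      · rw [if_pos hcp] at hg; cases hg
      rw [if_neg hcp] at hg
      by_cases hcr : ')' ∈ rest
      swap
      · rw [if_neg hcr] at hg; cases hg
      rw [if_pos hcr] at hg
      set content := rest.takeWhile (· ≠ ')') with hcont
      set tail := (rest.dropWhile (· ≠ ')')).tail with htail
      have hrsplit : rest = content ++ ')' :: tail := split_at_first ')' rest hcr
      have hco : ')' ∉ content := takeWhile_ne_not_mem ')' rest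
      -- extract the dictionary lookup from goodSeq
      set amb := PySem.List.sorted content (fun c => c) false with hamb
      replace hg : (match PySem.Dict.get? (PySem.Dict.mk rev) (String.ofList (PySem.Chars.upper amb)) with
        | none => false
        | some v => decide ('(' ∉ v.toList ∧ ')' ∉ v.toList) && goodSeq rev tail) = true := hg
      rcases hget : PySem.Dict.get? (PySem.Dict.mk rev) (String.ofList (PySem.Chars.upper amb)) with _ | v
      · rw [hget] at hg; cases hg
      rw [hget] at hg
      simp only [Bool.and_eq_true, decide_eq_true_eq] at hg
      obtain ⟨⟨hv1, hv2⟩, hgt⟩ := hg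
      -- the replacement code, parenthesis-free in both branches
      set code : String := if amb ≠ PySem.Chars.upper amb then PySem.Str.lower v else v with hcode
      have hcodefree : ∀ x ∈ code.toList, x ≠ '(' ∧ x ≠ ')' := by
        rw [hcode]
        split_ifs
        · exact lower_parenfree v hv1 hv2
        · intro x hx
          exact ⟨fun h => hv1 (h ▸ hx), fun h => hv2 (h ▸ hx)⟩
      -- find values
      have hlen2 : l = (pre ++ '(' :: content) ++ ')' :: tail := by
        rw [hsplit, hrsplit]; simp
      have hfo : PySem.Chars.find l ['('] = (pre.length : Int) := by
        rw [hsplit]; exact find_singleton_first '(' pre rest hpo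
      have hfc : PySem.Chars.find l [')'] = ((pre.length + 1 + content.length : Nat) : Int) := by
        rw [hlen2, find_singleton_first ')' _ _ (by
          simp only [List.mem_append, List.mem_cons, not_or]
          exact ⟨hcp, by simp, hco⟩)]
        simp [List.length_append]
        omega
      have hfoS : PySem.Str.find (String.ofList l) "(" = (pre.length : Int) := by
        simp only [PySem.Str.find, String.toList_ofList]
        simpa using hfo
      have hfcS : PySem.Str.find (String.ofList l) ")" = ((pre.length + 1 + content.length : Nat) : Int) := by
        simp only [PySem.Str.find, String.toList_ofList]
        simpa using hfc
      -- slices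
      have hdropl : l.drop (pre.length + 1) = content ++ ')' :: tail := by
        rw [hsplit, hrsplit]
        have h' : pre ++ '(' :: (content ++ ')' :: tail) = (pre ++ ['(']) ++ (content ++ ')' :: tail) := by simp
        rw [h', List.drop_left' (by simp)]
      have hslc : (PySem.Str.slice (String.ofList l) (some ((pre.length : Int) + 1)) (some ((pre.length + 1 + content.length : Nat) : Int))).toList = content := by
        simp only [PySem.Str.slice, PySem.Chars.slice, String.toList_ofList]
        rw [show ((pre.length : Int) + 1) = ((pre.length + 1 : Nat) : Int) by push_cast; ring]
        rw [show (((pre.length + 1 + content.length : Nat)) : Int) = ((pre.length + 1 : Nat) : Int) + ((content.length : Nat) : Int) by push_cast; ring]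
        rw [PySem.List.slice_natCast_add, hdropl]
        exact List.take_left ..
      have htake : l.take pre.length = pre := by
        rw [hsplit]; exact List.take_left ..
      have hdrop2 : l.drop (pre.length + 1 + content.length + 1) = tail := by
        rw [hlen2]
        have h' : (pre ++ '(' :: content) ++ ')' :: tail = ((pre ++ '(' :: content) ++ [')']) ++ tail := by simp
        rw [h', List.drop_left' (by simp; omega)]
      have hargL : (PySem.Str.slice (String.ofList l) none (some ((pre.length : Nat) : Int)) ++ code ++ PySem.Str.slice (String.ofList l) (some (((pre.length + 1 + content.length : Nat) : Int) + 1)) none).toList = pre ++ code.toList ++ tail := by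
        simp only [String.toList_append, PySem.Str.slice, PySem.Chars.slice, String.toList_ofList]
        rw [PySem.List.slice_to_natCast]
        rw [show (((pre.length + 1 + content.length : Nat) : Int) + 1) = ((pre.length + 1 + content.length + 1 : Nat) : Int) by push_cast; ring]
        rw [PySem.List.slice_from_natCast]
        rw [htake, hdrop2]
      have harg : PySem.Str.slice (String.ofList l) none (some ((pre.length : Nat) : Int)) ++ code ++ PySem.Str.slice (String.ofList l) (some (((pre.length + 1 + content.length : Nat) : Int) + 1)) none = String.ofList (pre ++ code.toList ++ tail) := by
        rw [← hargL, String.ofList_toList]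
      -- goodSeq and count for the recursive call
      have hplain : ∀ x ∈ pre ++ code.toList, x ≠ '(' ∧ x ≠ ')' := by
        intro x hx
        rcases List.mem_append.mp hx with hx | hx
        · exact ⟨fun h => hpo (h ▸ hx), fun h => hcp (h ▸ hx)⟩
        · exact hcodefree x hx
      have hgood : goodSeq rev (pre ++ code.toList ++ tail) = true :=
        goodSeq_glue rev (pre ++ code.toList) tail hplain hgt
      have hcnt : (pre ++ code.toList ++ tail).count '(' < f := by
        have hc0 : pre.count '(' = 0 := List.count_eq_zero.mpr hpo
        have hc1 : code.toList.count '(' = 0 :=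
          List.count_eq_zero.mpr (fun hx => (hcodefree _ hx).1 rfl)
        rw [hsplit, hrsplit] at hf
        simp [List.count_append, List.count_cons] at hf ⊢
        omega
      -- B's one step
      have hscan : scanB rev l = pre ++ (code.toList ++ scanB rev tail) := by
        conv_lhs => rw [hsplit, hrsplit]
        rw [scanB_append_plain rev pre _ (fun x hx hh => hpo (hh ▸ hx))]
        congr 1
        rw [scanB_group rev content tail hco]
        rw [← hamb]
        simp only [hget]
        rw [← hcode]
      -- assemble
      rw [replaceLoopA]
      rw [hfoS, hfcS]
      rw [if_pos (by omega)]
      rw [if_neg (by omega)]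
      rw [if_neg (by omega)]
      rw [hslc]
      have hkey : PySem.Str.upper (String.ofList amb) = String.ofList (PySem.Chars.upper amb) := by
        simp [PySem.Str.upper]
      simp only [← hamb, hkey, hget]
      have hiff : (String.ofList amb ≠ String.ofList (PySem.Chars.upper amb)) ↔ (amb ≠ PySem.Chars.upper amb) := by
        rw [toList_ne_iff]; simp
      rw [if_congr hiff rfl rfl, ← hcode]
      rw [harg, ih _ hgood hcnt]
      rw [hscan]
      rw [scanB_append_plain rev (pre ++ code.toList) tail (fun x hx hh => (hplain x hx).1 hh)]
      simp [List.append_assoc]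
    · -- no '(' : both sides are the identity
      rw [scanB_no_open rev l hop]
      have hfs : PySem.Str.find (String.ofList l) "(" = -1 := by
        have h1 := find_singleton_not_mem '(' l hop
        simp only [PySem.Str.find, String.toList_ofList]
        simpa using h1
      rw [replaceLoopA]
      simp only [hfs]
      norm_num

-- ===== VERDICT (by name: the statement is the Claim_ definition above) =====
theorem replace_parenthesized_ambigs_py_spec : Claim_equal_replace_parenthesized_ambigs_py := by
  intro seq rev _ hpre
  unfold Spec_replace_parenthesized_ambigs_py replace_parenthesized_ambigs_py replace_parenthesized_ambigs_py_alt
  rw [Pre_replace_parenthesized_ambigs_py, goodAux_eq] at hpre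
  have := main_loop rev (seq.toList.count '(' + 1) seq.toList hpre (by omega)
  simpa using this
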